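-- pv_equiv track=rewrite | github.com/jeqcho/in-context-subliminal-learning | experiments/icl_experiment/divergence_detection.py | find_divergence_positions
-- ===== SOURCE A (Python) =====
-- def find_divergence_positions(
--     loving_response: str,
--     hating_response: str,
-- ) -> tuple[list[int], int]:
--     """Find character positions where loving and hating responses differ.
--
--     At temperature=0, the generated token IS the argmax, so any difference
--     in the output indicates divergence.
--
--     Args:
--         loving_response: Response from loving persona
--         hating_response: Response from hating persona
--
--     Returns:
--         Tuple of (divergence_positions, total_length)
--     """
--     divergence_positions = []
--
--     # Compare character by character
--     max_len = max(len(loving_response), len(hating_response))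
--     min_len = min(len(loving_response), len(hating_response))
--
--     for i in range(min_len):
--         if loving_response[i] != hating_response[i]:
--             divergence_positions.append(i)
--
--     # If lengths differ, all extra positions are divergent
--     if len(loving_response) != len(hating_response):
--         for i in range(min_len, max_len):
--             divergence_positions.append(i)
--
--     return divergence_positions, max_len
-- ===== SOURCE B (Python) =====
-- def find_divergence_positions(
--     loving_response: str,
--     hating_response: str,
-- ) -> tuple[list[int], int]:
--     """Complement formulation: build the set of positions where the two
--     responses AGREE (only possible within the overlap), then the divergence
--     positions are every index of the full range not in that set."""
--     agree = {i for i, pair in enumerate(zip(loving_response, hating_response))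
--              if pair[0] == pair[1]}
--     max_len = max(len(loving_response), len(hating_response))
--     return [i for i in range(max_len) if i not in agree], max_len
-- ===== Notes on version B (the rewrite author's own statement) =====
-- stated objective: alternative
-- what changed: Instead of collecting mismatches directly with two index loops (overlap loop plus a tail loop), B builds the set of AGREEMENT positions from zip over the overlap and returns the complement of that set within range(max_len).
import Mathlib
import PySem

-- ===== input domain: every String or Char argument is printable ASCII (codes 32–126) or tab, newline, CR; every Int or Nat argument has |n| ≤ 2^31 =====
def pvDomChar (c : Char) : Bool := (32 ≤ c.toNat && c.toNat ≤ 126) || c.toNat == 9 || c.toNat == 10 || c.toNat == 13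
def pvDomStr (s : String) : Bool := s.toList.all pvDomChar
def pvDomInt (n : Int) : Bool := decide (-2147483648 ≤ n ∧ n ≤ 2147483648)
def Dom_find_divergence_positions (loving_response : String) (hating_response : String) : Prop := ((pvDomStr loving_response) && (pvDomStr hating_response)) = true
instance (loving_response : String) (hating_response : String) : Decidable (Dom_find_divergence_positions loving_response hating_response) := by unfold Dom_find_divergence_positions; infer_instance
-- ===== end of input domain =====

-- B inverts A's formulation: instead of collecting mismatch indices with two loops
-- (overlap loop plus tail loop), it builds the SET of agreement positions from the
-- zipped overlap and returns the complement of that set within range(max_len).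

-- ===== PORT A =====
def find_divergence_positions (loving_response : String) (hating_response : String) : List Int × Int :=
  let ls := loving_response.toList
  let hs := hating_response.toList
  -- divergence_positions = []
  -- max_len = max(len(loving_response), len(hating_response)); min_len = min(...)
  let max_len : Int := max (PySem.Str.len loving_response) (PySem.Str.len hating_response)
  let min_len : Int := min (PySem.Str.len loving_response) (PySem.Str.len hating_response)
  -- for i in range(min_len): if loving_response[i] != hating_response[i]: append(i)
  let dp : List Int := (PySem.List.pyRange 0 min_len 1).foldl
    (fun acc i => if PySem.List.pyGet? ls i ≠ PySem.List.pyGet? hs i then acc ++ [i] else acc) []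
  -- if len(loving_response) != len(hating_response): for i in range(min_len, max_len): append(i)
  let dp : List Int :=
    if PySem.Str.len loving_response ≠ PySem.Str.len hating_response then
      (PySem.List.pyRange min_len max_len 1).foldl (fun acc i => acc ++ [i]) dp
    else dp
  (dp, max_len)

-- ===== PORT B =====
def find_divergence_positions_alt (loving_response : String) (hating_response : String) : List Int × Int :=
  -- agree = {i for i, pair in enumerate(zip(loving, hating)) if pair[0] == pair[1]}
  let agree : PySem.Set Int := PySem.Set.ofList
    (((PySem.List.enumerate (loving_response.toList.zip hating_response.toList) 0).filter
        (fun p => p.2.1 == p.2.2)).map (·.1))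
  let max_len : Int := max (PySem.Str.len loving_response) (PySem.Str.len hating_response)
  -- [i for i in range(max_len) if i not in agree]
  ((PySem.List.pyRange 0 max_len 1).filter (fun j => !(PySem.Set.contains agree j)), max_len)

-- ===== PRECONDITION & SPEC =====
def Spec_find_divergence_positions (loving_response : String) (hating_response : String) (out : List Int × Int) : Prop := out = find_divergence_positions_alt loving_response hating_response
instance (loving_response : String) (hating_response : String) (out : List Int × Int) : Decidable (Spec_find_divergence_positions loving_response hating_response out) := by unfold Spec_find_divergence_positions; infer_instance

-- ===== CLAIM (what is proved, stated in full; the proofs are below) =====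
def Claim_equal_find_divergence_positions : Prop := ∀ (loving_response : String) (hating_response : String), Dom_find_divergence_positions loving_response hating_response → Spec_find_divergence_positions loving_response hating_response (find_divergence_positions loving_response hating_response)

-- ===== LEMMAS AND PROOFS =====

-- indexing a cons at a positive index steps into the tail
lemma pyGet?_cons_pos (x : Char) (xs : List Char) (k : Int) (hk : 1 ≤ k) :
    PySem.List.pyGet? (x :: xs) k = PySem.List.pyGet? xs (k - 1) := by
  rw [PySem.List.pyGet?_of_nonneg (x :: xs) (by omega), PySem.List.pyGet?_of_nonneg xs (by omega)]
  have h : k.toNat = (k - 1).toNat + 1 := by omega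
  rw [h]
  simp

-- B's agreement list, started at offset i, is the index range over the overlap
-- filtered by equality of the characters at that index
lemma agree_eq (ls hs : List Char) (i : Int) :
    ((PySem.List.enumerate (ls.zip hs) i).filter (fun p => p.2.1 == p.2.2)).map (·.1)
      = (PySem.List.pyRange i (i + (min ls.length hs.length : Nat)) 1).filter
          (fun j => PySem.List.pyGet? ls (j - i) == PySem.List.pyGet? hs (j - i)) := by
  induction ls generalizing hs i with
  | nil =>
      simp [PySem.List.pyRange_one_eq_nil (le_refl i)]
  | cons l lt ih =>
      cases hs with
      | nil => simp [PySem.List.pyRange_one_eq_nil (le_refl i)]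
      | cons h ht =>
          have hmin : (min (l :: lt).length (h :: ht).length : Int)
              = (min lt.length ht.length : Nat) + 1 := by
            push_cast [List.length_cons]
            omega
          rw [PySem.List.pyRange_one_cons (by push_cast [List.length_cons]; omega)]
          simp only [List.zip_cons_cons, PySem.List.enumerate_cons, List.filter_cons]
          rw [List.filter_congr (q := fun j =>
              PySem.List.pyGet? lt (j - (i + 1)) == PySem.List.pyGet? ht (j - (i + 1)))
            (by
              intro j hj
              rw [PySem.List.mem_pyRange_one] at hj
              rw [pyGet?_cons_pos l lt (j - i) (by omega),
                  pyGet?_cons_pos h ht (j - i) (by omega)]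
              have : j - i - 1 = j - (i + 1) := by ring
              rw [this])]
          have harg : i + 1 + ((min lt.length ht.length : Nat) : Int)
              = i + (min (l :: lt).length (h :: ht).length : Nat) := by
            push_cast at hmin ⊢
            omega
          rw [← harg, ← ih ht (i + 1)]
          have hhead : PySem.List.pyGet? (l :: lt) (i - i) = some l := by simp
          have hhead' : PySem.List.pyGet? (h :: ht) (i - i) = some h := by simp
          by_cases hlh : l = h
          · rw [if_pos (by simp [hlh]), if_pos (by simp [hlh])]
            simp
          · rw [if_neg (by simp [hlh]), if_neg (by simp [hlh])]

-- A's two loops are the same filtered range over the longer length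
lemma A_eq (ls hs : List Char) :
    (if (ls.length : Int) ≠ (hs.length : Int) then
        (PySem.List.pyRange (min (ls.length : Int) hs.length) (max (ls.length : Int) hs.length) 1).foldl
          (fun acc i => acc ++ [i])
          ((PySem.List.pyRange 0 (min (ls.length : Int) hs.length) 1).foldl
            (fun acc i => if PySem.List.pyGet? ls i ≠ PySem.List.pyGet? hs i then acc ++ [i] else acc) [])
      else
        (PySem.List.pyRange 0 (min (ls.length : Int) hs.length) 1).foldl
          (fun acc i => if PySem.List.pyGet? ls i ≠ PySem.List.pyGet? hs i then acc ++ [i] else acc) [])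
      = (PySem.List.pyRange 0 (max (ls.length : Int) hs.length) 1).filter
          (fun j => decide (PySem.List.pyGet? ls j ≠ PySem.List.pyGet? hs j)) := by
  simp only [PySem.List.foldl_append_ite_eq_filter, PySem.List.foldl_append_singleton_eq_self,
    List.nil_append]
  by_cases hmn : (ls.length : Int) = (hs.length : Int)
  · rw [if_neg (by simp [hmn]), hmn]
    simp
  · rw [if_pos hmn]
    rw [PySem.List.pyRange_one_append 0 (min (ls.length : Int) hs.length)
        (max (ls.length : Int) hs.length) (by positivity) min_le_max,
      List.filter_append]
    congr 1
    symm
    rw [List.filter_eq_self]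
    intro j hj
    rw [PySem.List.mem_pyRange_one] at hj
    rcases lt_or_gt_of_ne hmn with hlt | hgt
    · have h1 : PySem.List.pyGet? ls j = none := by
        rw [PySem.List.pyGet?_eq_none_iff]
        simp [PySem.Raise.InRange, min_eq_left (le_of_lt hlt)] at hj ⊢
        omega
      have h2 : (PySem.List.pyGet? hs j).isSome := by
        rw [PySem.List.pyGet?_eq_some_getElem hs
          (by simp at hj; omega)
          (by simp [max_eq_right (le_of_lt hlt)] at hj; omega)]
        rfl
      rcases Option.isSome_iff_exists.mp h2 with ⟨c, hc⟩
      simp [h1, hc]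
    · have h1 : PySem.List.pyGet? hs j = none := by
        rw [PySem.List.pyGet?_eq_none_iff]
        simp [PySem.Raise.InRange, min_eq_right (le_of_lt hgt)] at hj ⊢
        omega
      have h2 : (PySem.List.pyGet? ls j).isSome := by
        rw [PySem.List.pyGet?_eq_some_getElem ls
          (by simp at hj; omega)
          (by simp at hj; omega)]
        rfl
      rcases Option.isSome_iff_exists.mp h2 with ⟨c, hc⟩
      simp [h1, hc]

-- ===== VERDICT (by name: the statement is the Claim_ definition above) =====
theorem find_divergence_positions_spec : Claim_equal_find_divergence_positions := by
  intro l h _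
  unfold Spec_find_divergence_positions find_divergence_positions find_divergence_positions_alt
  simp only [PySem.Str.len_eq]
  refine Prod.ext ?_ rfl
  rw [A_eq l.toList h.toList]
  apply List.filter_congr
  intro j hj
  rw [PySem.List.mem_pyRange_one] at hj
  have hLl : (l.toList.length : Int) = (l.length : Int) := by simp
  have hLh : (h.toList.length : Int) = (h.length : Int) := by simp
  have hmem : (PySem.Set.contains (PySem.Set.ofList
      (((PySem.List.enumerate (l.toList.zip h.toList) 0).filter
        (fun p => p.2.1 == p.2.2)).map (·.1))) j = true)
      ↔ (j ∈ (PySem.List.pyRange 0 (min (l.toList.length : Int) h.toList.length) 1).filter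
          (fun k => PySem.List.pyGet? l.toList k == PySem.List.pyGet? h.toList k)) := by
    rw [PySem.Set.contains_iff, PySem.Set.mem_ofList]
    have := agree_eq l.toList h.toList 0
    simp only [zero_add, sub_zero] at this
    rw [this]
    constructor <;> (intro hx; convert hx using 2; push_cast; simp)
  by_cases hjmin : j < min (l.toList.length : Int) h.toList.length
  · have hget : (PySem.List.pyGet? l.toList j).isSome := by
      rw [PySem.List.pyGet?_eq_some_getElem l.toList (by omega) (by simp at hjmin ⊢; omega)]
      rfl
    by_cases heq : PySem.List.pyGet? l.toList j = PySem.List.pyGet? h.toList j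
    · have : PySem.Set.contains (PySem.Set.ofList (((PySem.List.enumerate (l.toList.zip h.toList) 0).filter (fun p => p.2.1 == p.2.2)).map (·.1))) j = true := hmem.mpr (by
        rw [List.mem_filter, PySem.List.mem_pyRange_one]
        exact ⟨⟨by omega, hjmin⟩, by simp [heq]⟩)
      rw [this]
      simp [heq]
    · have : ¬ PySem.Set.contains (PySem.Set.ofList (((PySem.List.enumerate (l.toList.zip h.toList) 0).filter (fun p => p.2.1 == p.2.2)).map (·.1))) j = true := by
        rw [hmem, List.mem_filter]
        intro ⟨_, hb⟩
        exact heq (by simpa using hb)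
      simp only [Bool.not_eq_true] at this
      rw [this]
      simp [heq]
  · -- j beyond the overlap: not in agree, and the two gets differ (one is none)
    have hnot : ¬ PySem.Set.contains (PySem.Set.ofList (((PySem.List.enumerate (l.toList.zip h.toList) 0).filter (fun p => p.2.1 == p.2.2)).map (·.1))) j = true := by
      rw [hmem, List.mem_filter, PySem.List.mem_pyRange_one]
      intro ⟨⟨_, hlt⟩, _⟩
      omega
    simp only [Bool.not_eq_true] at hnot
    have hne : PySem.List.pyGet? l.toList j ≠ PySem.List.pyGet? h.toList j := by
      rcases le_or_gt (l.toList.length : Int) (h.toList.length : Int) with hle | hgt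
      · have h1 : PySem.List.pyGet? l.toList j = none := by
          rw [PySem.List.pyGet?_eq_none_iff]
          simp [PySem.Raise.InRange]
          omega
        have h2 : (PySem.List.pyGet? h.toList j).isSome := by
          rw [PySem.List.pyGet?_eq_some_getElem h.toList (by omega)
            (by simp at hj; omega)]
          rfl
        rcases Option.isSome_iff_exists.mp h2 with ⟨c, hc⟩
        simp [h1, hc]
      · have h1 : PySem.List.pyGet? h.toList j = none := by
          rw [PySem.List.pyGet?_eq_none_iff]
          simp [PySem.Raise.InRange]
          omega
        have h2 : (PySem.List.pyGet? l.toList j).isSome := by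
          rw [PySem.List.pyGet?_eq_some_getElem l.toList (by omega)
            (by simp at hj; omega)]
          rfl
        rcases Option.isSome_iff_exists.mp h2 with ⟨c, hc⟩
        simp [h1, hc]
    rw [hnot]
    simp [hne]
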